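-- pv_equiv track=rewrite | github.com/Wanji-Jimmy/Mocklab999 | tmua-exam/scripts/import-nsaa-from-pdf.py | has_lookahead_chain
-- ===== SOURCE A (Python) =====
-- def has_lookahead_chain(
--   candidates_map: dict[int, list[tuple[int, int, int]]],
--   min_start: int,
--   question_number: int,
--   max_question: int,
--   depth: int,
-- ) -> bool:
--   if depth <= 0 or question_number > max_question:
--     return True
--
--   candidates = candidates_map.get(question_number, [])
--   for start, end, _score in candidates:
--     if start < min_start:
--       continue
--     if has_lookahead_chain(candidates_map, end, question_number + 1, max_question, depth - 1):
--       return True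
--   return False
-- ===== SOURCE B (Python) =====
-- def has_lookahead_chain(
--   candidates_map: dict[int, list[tuple[int, int, int]]],
--   min_start: int,
--   question_number: int,
--   max_question: int,
--   depth: int,
-- ) -> bool:
--   # Backward threshold DP: a chain from level j exists with minimum start m
--   # iff m <= (max start among candidates at level j whose end meets the
--   # threshold of the deeper levels). Compute that threshold from the deepest
--   # level back to the first; no feasible candidate at some level means False.
--   n = min(depth, max_question - question_number + 1)
--   if n <= 0:
--     return True
--   t = None  # None = no constraint yet (deepest level)
--   for j in range(n - 1, -1, -1):
--     best = None
--     for start, end, _score in candidates_map.get(question_number + j, []):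
--       if t is None or end <= t:
--         if best is None or start > best:
--           best = start
--     if best is None:
--       return False
--     t = best
--   return min_start <= t
-- ===== Notes on version B (the rewrite author's own statement) =====
-- stated objective: alternative
-- what changed: Replaces the recursive backtracking search by a backward dynamic program: since feasibility is monotone in min_start, each level is summarised by a single threshold (max start of candidates whose end meets the deeper threshold), computed in one backward pass.
import Mathlib
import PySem

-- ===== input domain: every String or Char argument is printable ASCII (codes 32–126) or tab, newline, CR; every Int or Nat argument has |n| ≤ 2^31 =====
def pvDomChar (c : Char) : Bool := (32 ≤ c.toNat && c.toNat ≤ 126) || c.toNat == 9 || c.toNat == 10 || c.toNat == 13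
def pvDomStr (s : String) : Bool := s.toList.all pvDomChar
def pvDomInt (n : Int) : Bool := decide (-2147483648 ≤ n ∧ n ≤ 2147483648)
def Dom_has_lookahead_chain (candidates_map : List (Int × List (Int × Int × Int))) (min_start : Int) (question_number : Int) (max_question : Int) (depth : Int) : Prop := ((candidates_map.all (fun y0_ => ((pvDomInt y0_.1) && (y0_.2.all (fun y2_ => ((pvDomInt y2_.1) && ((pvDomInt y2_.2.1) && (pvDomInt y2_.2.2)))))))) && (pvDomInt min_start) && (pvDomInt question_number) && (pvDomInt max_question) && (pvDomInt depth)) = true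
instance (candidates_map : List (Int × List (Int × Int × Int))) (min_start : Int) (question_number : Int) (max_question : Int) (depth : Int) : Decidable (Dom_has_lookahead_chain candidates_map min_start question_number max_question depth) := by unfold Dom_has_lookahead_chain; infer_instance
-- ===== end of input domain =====

-- B replaces A's recursive backtracking search by a backward threshold dynamic program (alternative algorithm; same return value, proved equal).

-- shared transliteration of candidates_map.get(q, []) (association-list dict, first match)
def pvLookupCands (cm : List (Int × List (Int × Int × Int))) (q : Int) : List (Int × Int × Int) :=
  match cm with
  | [] => []
  | (k, v) :: rest => if k = q then v else pvLookupCands rest q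

-- ===== PORT A =====
def has_lookahead_chain (candidates_map : List (Int × List (Int × Int × Int))) (min_start : Int) (question_number : Int) (max_question : Int) (depth : Int) : Bool :=
  if h : depth ≤ 0 ∨ question_number > max_question then true
  else
    (pvLookupCands candidates_map question_number).any (fun c =>
      if c.1 < min_start then false
      else has_lookahead_chain candidates_map c.2.1 (question_number + 1) max_question (depth - 1))
termination_by depth.toNat
decreasing_by
  rw [not_or] at h
  omega

-- ===== PORT B =====
-- inner loop of Source B: best = max start among candidates whose end meets threshold t (none = no constraint)
def hlcBest (t : Option Int) (cands : List (Int × Int × Int)) : Option Int :=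
  cands.foldl (fun best c =>
    if (match t with | none => true | some tv => decide (c.2.1 ≤ tv)) then
      match best with
      | none => some c.1
      | some b => if c.1 > b then some c.1 else best
    else best) none

-- outer loop of Source B: j = k-1 down to 0; returns none if some level has no feasible candidate
def hlcLoop (cm : List (Int × List (Int × Int × Int))) (qn : Int) : Nat → Option Int → Option (Option Int)
  | 0, t => some t
  | (k+1), t =>
    match hlcBest t (pvLookupCands cm (qn + (k : Int))) with
    | none => none
    | some b => hlcLoop cm qn k (some b)

def has_lookahead_chain_alt (candidates_map : List (Int × List (Int × Int × Int))) (min_start : Int) (question_number : Int) (max_question : Int) (depth : Int) : Bool :=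
  let n := min depth (max_question - question_number + 1)
  if n ≤ 0 then true
  else
    match hlcLoop candidates_map question_number n.toNat none with
    | none => false
    | some none => true
    | some (some tv) => decide (min_start ≤ tv)

-- ===== PRECONDITION & SPEC =====
def Spec_has_lookahead_chain (candidates_map : List (Int × List (Int × Int × Int))) (min_start : Int) (question_number : Int) (max_question : Int) (depth : Int) (out : Bool) : Prop := out = has_lookahead_chain_alt candidates_map min_start question_number max_question depth
instance (candidates_map : List (Int × List (Int × Int × Int))) (min_start : Int) (question_number : Int) (max_question : Int) (depth : Int) (out : Bool) : Decidable (Spec_has_lookahead_chain candidates_map min_start question_number max_question depth out) := by unfold Spec_has_lookahead_chain; infer_instance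

-- ===== CLAIM (what is proved, stated in full; the proofs are below) =====
def Claim_equal_has_lookahead_chain : Prop := ∀ (candidates_map : List (Int × List (Int × Int × Int))) (min_start : Int) (question_number : Int) (max_question : Int) (depth : Int), Dom_has_lookahead_chain candidates_map min_start question_number max_question depth → Spec_has_lookahead_chain candidates_map min_start question_number max_question depth (has_lookahead_chain candidates_map min_start question_number max_question depth)


-- ===== LEMMAS AND PROOFS =====

-- interpretation of a threshold: does min_start m satisfy it
def interpO (m : Int) (o : Option Int) : Bool :=
  match o with | none => false | some b => decide (m ≤ b)

-- interpretation of a loop result (mirrors the final match of has_lookahead_chain_alt)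
def hlcInterp (m : Int) (r : Option (Option Int)) : Bool :=
  match r with | none => false | some none => true | some (some tv) => decide (m ≤ tv)

-- the end-test of a candidate against threshold t
def hlcTest (t : Option Int) (e : Int) : Bool :=
  match t with | none => true | some tv => decide (e ≤ tv)

lemma hlcBest_foldl (t : Option Int) (cands : List (Int × Int × Int)) (acc : Option Int) (m : Int) :
    interpO m (cands.foldl (fun best c =>
      if (match t with | none => true | some tv => decide (c.2.1 ≤ tv)) then
        match best with
        | none => some c.1
        | some b => if c.1 > b then some c.1 else best
      else best) acc)
    = (interpO m acc || cands.any (fun c => hlcTest t c.2.1 && decide (m ≤ c.1))) := by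
  induction cands generalizing acc with
  | nil => simp [List.foldl]
  | cons c rest ih =>
    simp only [List.foldl_cons, List.any_cons, ih]
    have hstep : interpO m (if (match t with | none => true | some tv => decide (c.2.1 ≤ tv)) then
        match acc with
        | none => some c.1
        | some b => if c.1 > b then some c.1 else acc
      else acc) = (interpO m acc || (hlcTest t c.2.1 && decide (m ≤ c.1))) := by
      cases t <;> cases acc <;>
        simp only [interpO, hlcTest, decide_eq_true_eq] <;>
        split_ifs <;> (first | rfl | (rw [Bool.eq_iff_iff]; simp; omega))
    rw [hstep, Bool.or_assoc]

lemma hlcBest_any (t : Option Int) (cands : List (Int × Int × Int)) (m : Int) :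
    interpO m (hlcBest t cands) = cands.any (fun c => hlcTest t c.2.1 && decide (m ≤ c.1)) := by
  have := hlcBest_foldl t cands none m
  simpa [hlcBest, interpO] using this

-- unroll hlcLoop from the shallow end: the last processed level is qn
lemma hlcLoop_succ (cm : List (Int × List (Int × Int × Int))) (qn : Int) (k : Nat) (t : Option Int) :
    hlcLoop cm qn (k + 1) t
      = match hlcLoop cm (qn + 1) k t with
        | none => none
        | some t' => match hlcBest t' (pvLookupCands cm qn) with
          | none => none
          | some b => some (some b) := by
  induction k generalizing qn t with
  | zero => simp [hlcLoop]
  | succ k ih =>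
    have hidx : qn + ((k + 1 : Nat) : Int) = (qn + 1) + (k : Int) := by push_cast; ring
    show (match hlcBest t (pvLookupCands cm (qn + ((k + 1 : Nat) : Int))) with
          | none => none
          | some b => hlcLoop cm qn (k + 1) (some b)) = _
    rw [hidx]
    show _ = (match (match hlcBest t (pvLookupCands cm ((qn + 1) + (k : Int))) with
          | none => none
          | some b => hlcLoop cm (qn + 1) k (some b)) with
        | none => none
        | some t' => match hlcBest t' (pvLookupCands cm qn) with
          | none => none
          | some b => some (some b))
    cases hlcBest t (pvLookupCands cm ((qn + 1) + (k : Int))) with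
    | none => rfl
    | some b => simpa using ih qn (some b)

-- main invariant: A equals the interpretation of B's backward threshold loop
lemma hlc_eq_loop (cm : List (Int × List (Int × Int × Int))) :
    ∀ (k : Nat) (d qn maxq m : Int), (min d (maxq - qn + 1)).toNat = k →
    has_lookahead_chain cm m qn maxq d = hlcInterp m (hlcLoop cm qn k none) := by
  intro k
  induction k with
  | zero =>
    intro d qn maxq m hk
    have hc : d ≤ 0 ∨ qn > maxq := by omega
    rw [has_lookahead_chain]
    simp [hc, hlcLoop, hlcInterp]
  | succ k ih =>
    intro d qn maxq m hk
    have hd : ¬ (d ≤ 0 ∨ qn > maxq) := by omega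
    have hk' : (min (d - 1) (maxq - (qn + 1) + 1)).toNat = k := by omega
    rw [has_lookahead_chain]
    simp only [hd, dite_false]
    rw [hlcLoop_succ]
    cases hr : hlcLoop cm (qn + 1) k none with
    | none =>
      simp only [hlcInterp]
      rw [List.any_eq_false]
      intro c _
      rw [ih (d - 1) (qn + 1) maxq c.2.1 hk', hr]
      simp [hlcInterp]
    | some tt =>
      have hpred : (fun c : Int × Int × Int =>
          if c.1 < m then false
          else has_lookahead_chain cm c.2.1 (qn + 1) maxq (d - 1))
          = (fun c : Int × Int × Int => hlcTest tt c.2.1 && decide (m ≤ c.1)) := by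
        funext c
        rw [ih (d - 1) (qn + 1) maxq c.2.1 hk', hr]
        by_cases hcm : c.1 < m <;>
          cases tt <;> simp [hcm, hlcInterp, hlcTest] <;> try omega
      rw [hpred, ← hlcBest_any tt (pvLookupCands cm qn) m]
      cases hB : hlcBest tt (pvLookupCands cm qn) <;> simp [hB, hlcInterp, interpO]

-- ===== VERDICT (by name: the statement is the Claim_ definition above) =====
theorem has_lookahead_chain_spec : Claim_equal_has_lookahead_chain := by
  intro cm m qn maxq d _
  unfold Spec_has_lookahead_chain has_lookahead_chain_alt
  by_cases hn : min d (maxq - qn + 1) ≤ 0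
  · have hc : d ≤ 0 ∨ qn > maxq := by omega
    rw [has_lookahead_chain]
    simp [hn, hc]
  · simp only [hn, if_false]
    rw [hlc_eq_loop cm (min d (maxq - qn + 1)).toNat d qn maxq m rfl]
    cases hlcLoop cm qn (min d (maxq - qn + 1)).toNat none with
    | none => rfl
    | some t => cases t <;> rfl
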